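-- pv_equiv track=rewrite | github.com/LowByteFox/shark | doc/gen.py | transform
-- ===== SOURCE A (Python) =====
-- def transform(arr):
--     out = []
--
--     end = 32
--
--     for length, name in arr:
--         range_start = 32 - end
--         range_end = range_start + length - 1
--         out.append((range_start, range_end, name))
--
--         end -= length
--     out.reverse()
--
--     return out
-- ===== SOURCE B (Python) =====
-- def transform(arr):
--     def go(items, pos):
--         if not items:
--             return []
--         (length, name), rest = items[0], items[1:]
--         return go(rest, pos + length) + [(pos, pos + length - 1, name)]
--     return go(list(arr), 0)
-- ===== Notes on version B (the rewrite author's own statement) =====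
-- stated objective: simpler
-- what changed: B is a recursion carrying a running start position from 0 that appends each tuple after the recursive call, so the output emerges already reversed with no 32-based countdown and no reverse() pass.
import Mathlib
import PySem

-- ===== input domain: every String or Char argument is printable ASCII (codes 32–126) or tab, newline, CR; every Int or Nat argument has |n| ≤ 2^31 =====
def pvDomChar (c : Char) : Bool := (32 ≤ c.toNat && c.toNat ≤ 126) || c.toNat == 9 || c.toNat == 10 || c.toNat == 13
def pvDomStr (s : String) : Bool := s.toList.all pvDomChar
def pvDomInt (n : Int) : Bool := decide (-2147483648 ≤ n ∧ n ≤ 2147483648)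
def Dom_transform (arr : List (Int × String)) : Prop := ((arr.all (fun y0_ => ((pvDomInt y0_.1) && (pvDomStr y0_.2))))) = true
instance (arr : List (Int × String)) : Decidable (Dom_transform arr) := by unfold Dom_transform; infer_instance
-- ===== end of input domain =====

-- B replaces A's forward accumulator loop (32-based countdown) plus reverse() by a
-- structural recursion carrying the running start position, appending each tuple
-- after the recursive call so the output is produced already reversed.

-- ===== PORT A =====
-- loop state: (out, end); one step of A's for-loop
def transformStepA (st : List (Int × Int × String) × Int) (p : Int × String) :
    List (Int × Int × String) × Int :=
  let range_start := 32 - st.2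
  let range_end := range_start + p.1 - 1
  (st.1 ++ [(range_start, range_end, p.2)], st.2 - p.1)

def transform (arr : List (Int × String)) : List (Int × Int × String) :=
  (arr.foldl transformStepA ([], 32)).1.reverse

-- ===== PORT B =====
-- B's inner recursive 'go(items, pos)'
def transformGo : List (Int × String) → Int → List (Int × Int × String)
  | [], _ => []
  | (length, name) :: rest, pos =>
      transformGo rest (pos + length) ++ [(pos, pos + length - 1, name)]

def transform_alt (arr : List (Int × String)) : List (Int × Int × String) :=
  transformGo arr 0

-- ===== PRECONDITION & SPEC =====
def Spec_transform (arr : List (Int × String)) (out : List (Int × Int × String)) : Prop := out = transform_alt arr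
instance (arr : List (Int × String)) (out : List (Int × Int × String)) : Decidable (Spec_transform arr out) := by unfold Spec_transform; infer_instance

-- ===== CLAIM =====
def Claim_equal_transform : Prop := ∀ (arr : List (Int × String)), Dom_transform arr → Spec_transform arr (transform arr)

-- ===== LEMMAS AND PROOFS =====

-- A's fold, characterized: appends tuples starting at 32 - e and decrements e
theorem pvFoldA (arr : List (Int × String)) :
    ∀ (out : List (Int × Int × String)) (e : Int),
      arr.foldl transformStepA (out, e) =
        (out ++ (transformGo arr (32 - e)).reverse, e - (arr.map Prod.fst).sum) := by
  induction arr with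
  | nil => intro out e; simp [transformGo]
  | cons p t ih =>
    intro out e
    obtain ⟨l, n⟩ := p
    simp only [List.foldl_cons, transformStepA, ih, transformGo, List.map_cons, List.sum_cons]
    have h1 : 32 - (e - l) = 32 - e + l := by ring
    have h2 : e - l - (t.map Prod.fst).sum = e - (l + (t.map Prod.fst).sum) := by ring
    rw [h1, h2]; simp

-- ===== VERDICT =====
theorem transform_spec : Claim_equal_transform := by
  intro arr _
  unfold Spec_transform transform transform_alt
  rw [pvFoldA]
  norm_num
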